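-- pv_equiv track=rewrite | github.com/katoro8989/ShinkaEvolve_for_timimg_attack | results_20251223_024627/gen_51/original.py | secure_compare
-- ===== SOURCE A (Python) =====
-- def secure_compare(secret: str, input_val: str) -> bool:
--     """
--     Constant-time comparison between two strings.
--     Returns True if secret and input_val are exactly equal, otherwise False.
--     The implementation avoids early returns and inspects all characters (padding
--     shorter string with zeros) to ensure uniform timing characteristics.
--     """
--     len_s = len(secret)
--     len_i = len(input_val)
--
--     # Start with a difference indicator that also captures length differences
--     diff = len_s ^ len_i
--
--     # Compare up to the maximum length of the two strings
--     n = max(len_s, len_i)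
--     for idx in range(n):
--         # Fetch character code points if within bounds; otherwise use 0 as padding
--         a = ord(secret[idx]) if idx < len_s else 0
--         b = ord(input_val[idx]) if idx < len_i else 0
--         diff |= a ^ b  # accumulate any difference in a way that does not short-circuit
--
--     return diff == 0
-- ===== SOURCE B (Python) =====
-- def secure_compare(secret: str, input_val: str) -> bool:
--     """Direct equality: True iff the strings are exactly equal."""
--     return secret == input_val
-- ===== Notes on version B (the rewrite author's own statement) =====
-- stated objective: simpler
-- what changed: Replaces the padded XOR/OR accumulation loop over max(len) characters with a single native string equality comparison.
import Mathlib
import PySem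

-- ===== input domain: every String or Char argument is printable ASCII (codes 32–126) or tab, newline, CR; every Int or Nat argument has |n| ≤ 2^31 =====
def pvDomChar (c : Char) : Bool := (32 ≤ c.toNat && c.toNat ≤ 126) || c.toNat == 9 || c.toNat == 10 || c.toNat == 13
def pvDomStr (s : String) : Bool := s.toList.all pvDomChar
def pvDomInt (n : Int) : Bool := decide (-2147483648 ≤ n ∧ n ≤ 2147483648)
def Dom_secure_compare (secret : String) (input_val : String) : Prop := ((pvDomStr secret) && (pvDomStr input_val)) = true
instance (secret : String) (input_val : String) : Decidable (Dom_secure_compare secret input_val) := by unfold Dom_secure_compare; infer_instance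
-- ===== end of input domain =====

-- B replaces A's padded XOR/OR accumulation loop with one native equality test; same result on every input.

-- ===== PORT A =====
-- literal transliteration: diff starts as len_s ^ len_i, then OR-accumulates a ^ b over range(max)
def secure_compare (secret : String) (input_val : String) : Bool :=
  let s := secret.toList
  let t := input_val.toList
  let len_s := s.length
  let len_i := t.length
  let diff0 := len_s ^^^ len_i
  let n := max len_s len_i
  let diff := (List.range n).foldl (fun diff idx =>
    let a := if idx < len_s then (s.getD idx (Char.ofNat 0)).toNat else 0
    let b := if idx < len_i then (t.getD idx (Char.ofNat 0)).toNat else 0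
    diff ||| (a ^^^ b)) diff0
  diff == 0

-- ===== PORT B =====
def secure_compare_alt (secret : String) (input_val : String) : Bool :=
  secret == input_val

-- ===== PRECONDITION & SPEC =====
def Spec_secure_compare (secret : String) (input_val : String) (out : Bool) : Prop := out = secure_compare_alt secret input_val
instance (secret : String) (input_val : String) (out : Bool) : Decidable (Spec_secure_compare secret input_val out) := by unfold Spec_secure_compare; infer_instance

-- ===== CLAIM (what is proved, stated in full; the proofs are below) =====
def Claim_equal_secure_compare : Prop := ∀ (secret : String) (input_val : String), Dom_secure_compare secret input_val → Spec_secure_compare secret input_val (secure_compare secret input_val)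

-- ===== LEMMAS AND PROOFS =====

-- an OR-accumulating fold is zero iff the seed and every contribution are zero
theorem foldl_or_eq_zero (g : Nat → Nat) (l : List Nat) (init : Nat) :
    (l.foldl (fun d i => d ||| g i) init = 0) ↔ (init = 0 ∧ ∀ i ∈ l, g i = 0) := by
  induction l generalizing init with
  | nil => simp
  | cons a l ih =>
    have hor : init ||| g a = 0 ↔ init = 0 ∧ g a = 0 := by
      constructor
      · intro h
        have h1 : init ≤ init ||| g a := Nat.left_le_or
        have h2 : g a ≤ init ||| g a := Nat.right_le_or
        omega
      · rintro ⟨e1, e2⟩; simp [e1, e2]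
    simp only [List.foldl_cons, ih, hor, List.mem_cons]
    constructor
    · rintro ⟨⟨h1, h2⟩, h3⟩
      exact ⟨h1, fun i hi => hi.elim (fun e => e ▸ h2) (h3 i)⟩
    · rintro ⟨h1, h2⟩
      exact ⟨⟨h1, h2 a (Or.inl rfl)⟩, fun i hi => h2 i (Or.inr hi)⟩

theorem secure_compare_true_iff (secret input_val : String) :
    secure_compare secret input_val = true ↔ secret.toList = input_val.toList := by
  unfold secure_compare
  simp only [beq_iff_eq, foldl_or_eq_zero, List.mem_range]
  constructor
  · rintro ⟨hlen, hchars⟩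
    have hlen' : secret.toList.length = input_val.toList.length := by
      have := Nat.xor_eq_zero_iff.mp hlen
      exact this
    apply List.ext_getElem hlen'
    intro i h1 h2
    have hi : i < max secret.toList.length input_val.toList.length := lt_max_of_lt_left h1
    have := hchars i hi
    simp only [if_pos h1, if_pos h2] at this
    have hc : (secret.toList.getD i (Char.ofNat 0)).toNat = (input_val.toList.getD i (Char.ofNat 0)).toNat :=
      Nat.xor_eq_zero_iff.mp this
    have : (secret.toList.getD i (Char.ofNat 0)) = (input_val.toList.getD i (Char.ofNat 0)) := Char.ext (UInt32.toNat_inj.mp hc)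
    rw [List.getD_eq_getElem _ _ h1, List.getD_eq_getElem _ _ h2] at this
    exact this
  · intro h
    rw [h]
    refine ⟨by simp [Nat.xor_self], fun i _ => by simp [Nat.xor_self]⟩

theorem secure_compare_eq_alt (secret input_val : String) :
    secure_compare secret input_val = secure_compare_alt secret input_val := by
  unfold secure_compare_alt
  by_cases h : secret = input_val
  · subst h
    simp [secure_compare_true_iff]
  · have h2 : secret.toList ≠ input_val.toList := fun e => h (String.toList_inj.mp e)
    have : secure_compare secret input_val ≠ true := by
      simp [secure_compare_true_iff, h2]
    simp [Bool.not_eq_true] at this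
    simp [this, h]

-- ===== VERDICT (by name: the statement is the Claim_ definition above) =====
theorem secure_compare_spec : Claim_equal_secure_compare := by
  intro secret input_val _
  exact secure_compare_eq_alt secret input_val
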